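-- pv_equiv track=rewrite | github.com/egormeister-os/Labs | ABIS/lab1/src/operations/bcd_excess3_arithmetic.py | _add_tetrads
-- ===== SOURCE A (Python) =====
-- def _add_tetrads(left: list[int], right: list[int], carry_in: int) -> tuple[list[int], int]:
--     result = [0, 0, 0, 0]
--     carry = carry_in
--
--     for idx in range(3, -1, -1):
--         bit_sum = left[idx] + right[idx] + carry
--         result[idx] = bit_sum % 2
--         carry = bit_sum // 2
--
--     return result, carry
-- ===== SOURCE B (Python) =====
-- def _add_tetrads(left: list[int], right: list[int], carry_in: int) -> tuple[list[int], int]: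
--     total = (8 * (left[0] + right[0]) + 4 * (left[1] + right[1])
--              + 2 * (left[2] + right[2]) + (left[3] + right[3]) + carry_in)
--     return [total // 8 % 2, total // 4 % 2, total // 2 % 2, total % 2], total // 16
-- ===== Notes on version B (the rewrite author's own statement) =====
-- stated objective: simpler
-- what changed: Replaces the bit-serial carry-propagation loop with in-place list mutation by one weighted integer addition followed by closed-form digit extraction (total//2^k % 2) and carry = total // 16.
import Mathlib
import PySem

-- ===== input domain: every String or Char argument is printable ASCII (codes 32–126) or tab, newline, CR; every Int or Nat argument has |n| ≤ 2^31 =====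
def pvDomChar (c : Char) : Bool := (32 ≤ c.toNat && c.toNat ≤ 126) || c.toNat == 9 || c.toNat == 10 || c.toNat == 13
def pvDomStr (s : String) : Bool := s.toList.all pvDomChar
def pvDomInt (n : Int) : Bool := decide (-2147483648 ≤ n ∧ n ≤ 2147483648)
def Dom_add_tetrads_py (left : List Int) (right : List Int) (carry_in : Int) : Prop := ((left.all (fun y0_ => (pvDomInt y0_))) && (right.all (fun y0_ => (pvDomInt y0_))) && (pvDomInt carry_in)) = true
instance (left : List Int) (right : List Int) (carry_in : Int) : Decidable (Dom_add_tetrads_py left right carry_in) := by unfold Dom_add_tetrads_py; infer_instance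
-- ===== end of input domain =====

-- B replaces A's bit-serial carry loop (mutating result[idx]) by one weighted integer
-- sum plus closed-form digit extraction; objective: simpler.

-- ===== PORT A =====
-- literal transliteration: result = [0,0,0,0]; for idx in range(3,-1,-1): …
def add_tetrads_py (left : List Int) (right : List Int) (carry_in : Int) : List Int × Int :=
  let st := (PySem.List.pyRange 3 (-1) (-1)).foldl
    (fun (st : List Int × Int) idx =>
      let bit_sum := PySem.List.pyGetD left idx 0 + PySem.List.pyGetD right idx 0 + st.2
      (PySem.List.pySetD st.1 idx (PySem.Int.mod bit_sum 2), PySem.Int.floordiv bit_sum 2))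
    (([0, 0, 0, 0] : List Int), carry_in)
  (st.1, st.2)

-- ===== PORT B =====
def add_tetrads_py_alt (left : List Int) (right : List Int) (carry_in : Int) : List Int × Int :=
  let total := 8 * (PySem.List.pyGetD left 0 0 + PySem.List.pyGetD right 0 0)
    + 4 * (PySem.List.pyGetD left 1 0 + PySem.List.pyGetD right 1 0)
    + 2 * (PySem.List.pyGetD left 2 0 + PySem.List.pyGetD right 2 0)
    + (PySem.List.pyGetD left 3 0 + PySem.List.pyGetD right 3 0) + carry_in
  ([PySem.Int.mod (PySem.Int.floordiv total 8) 2,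
    PySem.Int.mod (PySem.Int.floordiv total 4) 2,
    PySem.Int.mod (PySem.Int.floordiv total 2) 2,
    PySem.Int.mod total 2], PySem.Int.floordiv total 16)

-- ===== PRECONDITION & SPEC =====
-- Pre_ excludes exactly the lists with fewer than 4 entries, on which A (left[idx]/right[idx]
-- for idx = 3..0) raises IndexError; B raises there too.
def Pre_add_tetrads_py (left : List Int) (right : List Int) (carry_in : Int) : Prop :=
  4 ≤ left.length ∧ 4 ≤ right.length
instance (left : List Int) (right : List Int) (carry_in : Int) : Decidable (Pre_add_tetrads_py left right carry_in) := by unfold Pre_add_tetrads_py; infer_instance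

def pvWitness_add_tetrads_py : List Int × List Int × Int := ([1, 0, 1, 0], [0, 1, 1, 0], 1)

def Spec_add_tetrads_py (left : List Int) (right : List Int) (carry_in : Int) (out : List Int × Int) : Prop := out = add_tetrads_py_alt left right carry_in
instance (left : List Int) (right : List Int) (carry_in : Int) (out : List Int × Int) : Decidable (Spec_add_tetrads_py left right carry_in out) := by unfold Spec_add_tetrads_py; infer_instance

-- ===== CLAIM (what is proved, stated in full; the proofs are below) =====
def Claim_equal_add_tetrads_py : Prop := ∀ (left : List Int) (right : List Int) (carry_in : Int), Dom_add_tetrads_py left right carry_in → Pre_add_tetrads_py left right carry_in → Spec_add_tetrads_py left right carry_in (add_tetrads_py left right carry_in)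

-- ===== LEMMAS AND PROOFS =====

-- helper lemmas (used only by the proof below)
theorem pv_get0 (x0 x1 x2 x3 : Int) (t : List Int) : PySem.List.pyGetD (x0::x1::x2::x3::t) 0 0 = x0 := by
  rw [PySem.List.pyGetD_eq_getElem _ 0 (by omega) (by simp; omega)]; rfl
theorem pv_get1 (x0 x1 x2 x3 : Int) (t : List Int) : PySem.List.pyGetD (x0::x1::x2::x3::t) 1 0 = x1 := by
  rw [PySem.List.pyGetD_eq_getElem _ 0 (by omega) (by simp; omega)]; rfl
theorem pv_get2 (x0 x1 x2 x3 : Int) (t : List Int) : PySem.List.pyGetD (x0::x1::x2::x3::t) 2 0 = x2 := by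
  rw [PySem.List.pyGetD_eq_getElem _ 0 (by omega) (by simp; omega)]; rfl
theorem pv_get3 (x0 x1 x2 x3 : Int) (t : List Int) : PySem.List.pyGetD (x0::x1::x2::x3::t) 3 0 = x3 := by
  rw [PySem.List.pyGetD_eq_getElem _ 0 (by omega) (by simp; omega)]; rfl

-- ===== VERDICT (by name: the statement is the Claim_ definition above) =====
theorem add_tetrads_py_spec : Claim_equal_add_tetrads_py := by
  intro left right carry_in _ hpre
  obtain ⟨hl, hr⟩ := hpre
  obtain ⟨l0, l1, l2, l3, lt, rfl⟩ : ∃ a b c d t, left = a :: b :: c :: d :: t := by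
    match left, hl with
    | a :: b :: c :: d :: t, _ => exact ⟨a, b, c, d, t, rfl⟩
  obtain ⟨r0, r1, r2, r3, rt, rfl⟩ : ∃ a b c d t, right = a :: b :: c :: d :: t := by
    match right, hr with
    | a :: b :: c :: d :: t, _ => exact ⟨a, b, c, d, t, rfl⟩
  have hrange : PySem.List.pyRange 3 (-1) (-1) = [3, 2, 1, 0] := by decide
  unfold Spec_add_tetrads_py add_tetrads_py add_tetrads_py_alt
  rw [hrange]
  simp only [List.foldl, pv_get0, pv_get1, pv_get2, pv_get3,
    PySem.List.pySetD_of_nonneg _ _ (by omega : (0:Int) ≤ 0),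
    PySem.List.pySetD_of_nonneg _ _ (by omega : (0:Int) ≤ 1),
    PySem.List.pySetD_of_nonneg _ _ (by omega : (0:Int) ≤ 2),
    PySem.List.pySetD_of_nonneg _ _ (by omega : (0:Int) ≤ 3),
    PySem.Int.mod_eq_emod_of_pos (by norm_num : (0:Int) < 2),
    PySem.Int.floordiv_eq_ediv_of_pos (by norm_num : (0:Int) < 2),
    PySem.Int.floordiv_eq_ediv_of_pos (by norm_num : (0:Int) < 4),
    PySem.Int.floordiv_eq_ediv_of_pos (by norm_num : (0:Int) < 8),
    PySem.Int.floordiv_eq_ediv_of_pos (by norm_num : (0:Int) < 16)]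
  norm_num [List.set, show Int.toNat 3 = 3 from rfl, show Int.toNat 2 = 2 from rfl, List.cons.injEq]
  refine ⟨⟨?_, ?_, ?_, ?_⟩, ?_⟩ <;> omega
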